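-- pv_equiv track=rewrite | github.com/AAAR-Salmon/atcoder-log | abc161-180/abc172/c/c.py | cumsum
-- ===== SOURCE A (Python) =====
-- def cumsum(A, C):
-- 	yield 0
-- 	s=0
-- 	for a in A:
-- 		s += a
-- 		if s > C:
-- 			return
-- 		yield s
-- ===== SOURCE B (Python) =====
-- from itertools import accumulate
--
-- def cumsum(A, C):
--     # Staged: (1) materialize all prefix sums (with the mandatory leading 0),
--     # (2) locate the first sum after the leading 0 that exceeds C,
--     # (3) yield the slice up to that point.
--     sums = list(accumulate(A, initial=0))
--     cut = next((i for i, s in enumerate(sums) if i > 0 and s > C), len(sums))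
--     yield from sums[:cut]
-- ===== Notes on version B (the rewrite author's own statement) =====
-- stated objective: alternative
-- what changed: Replaces the streaming accumulator loop with early return by three staged passes: materialize the full prefix-sum list, find the cutoff index of the first sum exceeding C, and yield the slice up to it.
import Mathlib
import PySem

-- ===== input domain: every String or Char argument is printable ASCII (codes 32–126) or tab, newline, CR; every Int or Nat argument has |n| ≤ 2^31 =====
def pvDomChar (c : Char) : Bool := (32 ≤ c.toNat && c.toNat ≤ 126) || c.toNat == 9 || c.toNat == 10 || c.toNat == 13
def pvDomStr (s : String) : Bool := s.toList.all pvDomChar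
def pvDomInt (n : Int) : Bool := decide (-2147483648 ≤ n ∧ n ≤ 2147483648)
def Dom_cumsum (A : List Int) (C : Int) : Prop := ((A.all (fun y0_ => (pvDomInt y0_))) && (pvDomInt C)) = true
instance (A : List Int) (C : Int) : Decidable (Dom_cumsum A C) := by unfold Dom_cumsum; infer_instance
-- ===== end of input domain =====

-- B replaces A's streaming accumulator loop (stop on first sum > C) by staged passes:
-- build the full prefix-sum list, find the cutoff index, yield the slice; yielded values are identical
-- (both are generators; only the yielded values are compared).

-- ===== PORT A =====
-- generator: yield 0; s=0; for a in A: s+=a; if s > C: return; yield s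
def cumsumGo (C : Int) : List Int → Int → List Int
  | [], _ => []
  | a :: rest, s =>
    let s' := s + a
    if s' > C then [] else s' :: cumsumGo C rest s'

def cumsum (A : List Int) (C : Int) : List Int :=
  0 :: cumsumGo C A 0

-- ===== PORT B =====
-- sums = list(accumulate(A, initial=0))  — full prefix-sum list with leading 0
-- (List.scanl is the library counterpart of itertools.accumulate with an initial value)
-- cut = next((i for i, s in enumerate(sums) if i > 0 and s > C), len(sums))
--   i.e. 1 + first index of the tail with s > C, else len(sums)
-- return sums[:cut]
def cumsum_alt (A : List Int) (C : Int) : List Int :=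
  let sums := List.scanl (· + ·) 0 A
  let cut := match (sums.drop 1).findIdx? (fun s => s > C) with
    | some i => i + 1
    | none => sums.length
  sums.take cut

-- ===== PRECONDITION & SPEC =====
def Spec_cumsum (A : List Int) (C : Int) (out : List Int) : Prop := out = cumsum_alt A C
instance (A : List Int) (C : Int) (out : List Int) : Decidable (Spec_cumsum A C out) := by unfold Spec_cumsum; infer_instance

-- ===== CLAIM (what is proved, stated in full; the proofs are below) =====
def Claim_equal_cumsum : Prop := ∀ (A : List Int) (C : Int), Dom_cumsum A C → Spec_cumsum A C (cumsum A C)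

-- ===== LEMMAS AND PROOFS =====

-- running prefix sums of A starting from accumulator s (the tail of scanl)
def pfxFrom : List Int → Int → List Int
  | [], _ => []
  | a :: rest, s => (s + a) :: pfxFrom rest (s + a)

theorem scanl_eq_pfxFrom (A : List Int) (s : Int) :
    List.scanl (· + ·) s A = s :: pfxFrom A s := by
  induction A generalizing s with
  | nil => rfl
  | cons a rest ih => simp [List.scanl_cons, pfxFrom, ih]

theorem go_eq_takeWhile (C : Int) (A : List Int) (s : Int) :
    cumsumGo C A s = (pfxFrom A s).takeWhile (fun x => x ≤ C) := by
  induction A generalizing s with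
  | nil => rfl
  | cons a rest ih =>
    simp only [cumsumGo, pfxFrom, List.takeWhile]
    by_cases h : s + a > C
    · simp [h, show ¬ (s + a ≤ C) by omega]
    · simp [h, show s + a ≤ C by omega, ih]

theorem takeWhile_eq_take_findIdx (C : Int) (l : List Int) :
    l.takeWhile (fun x => x ≤ C) =
      l.take (match l.findIdx? (fun x => x > C) with
        | some i => i
        | none => l.length) := by
  induction l with
  | nil => rfl
  | cons a rest ih =>
    rw [List.findIdx?_cons]
    by_cases h : a > C
    · simp [show ¬ (a ≤ C) by omega, show decide (a > C) = true by simpa using h]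
    · have hb : decide (a > C) = false := by simpa using h
      simp only [hb, Bool.false_eq_true, if_false]
      cases hf : rest.findIdx? (fun x => x > C) with
      | some i =>
        rw [List.takeWhile_cons_of_pos (by simp; omega), ih, hf]
        simp [List.take_succ_cons]
      | none =>
        rw [List.takeWhile_cons_of_pos (by simp; omega), ih, hf]
        simp [List.take_succ_cons]

-- ===== VERDICT (by name: the statement is the Claim_ definition above) =====
theorem cumsum_spec : Claim_equal_cumsum := by
  intro A C _
  unfold Spec_cumsum cumsum cumsum_alt
  rw [scanl_eq_pfxFrom]
  simp only [List.drop_one, List.tail_cons, List.length_cons]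
  cases hf : (pfxFrom A 0).findIdx? (fun x => x > C) with
  | some i =>
    simp only [List.take_succ_cons]
    rw [go_eq_takeWhile, takeWhile_eq_take_findIdx, hf]
  | none =>
    simp only [List.take_succ_cons]
    rw [go_eq_takeWhile, takeWhile_eq_take_findIdx, hf,
      List.take_of_length_le (by simp)]
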